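-- pv_equiv track=rewrite | github.com/martiansideofthemoon/rankgen | rankgen/utils.py | extend_sequence
-- ===== SOURCE A (Python) =====
-- def extend_sequence(sents, sent_lens, start, limit, exceed_len=False,
--                     direction='prefix', skip_sentences=None):
--   """Extend a sequence by adding more sentences in prefix or suffix."""
--   curr_value = start
--   total_length = sent_lens[curr_value]
--   full_sequence = sents[curr_value]
--   assert len(sents) == len(sent_lens)
--
--   if direction == 'prefix':
--     increment = -1
--     concat_fn = lambda curr, extra: extra + ' ' + curr
--     continue_fn = lambda x: x >= 0
--   else:
--     increment = 1
--     concat_fn = lambda curr, extra: curr + ' ' + extra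
--     continue_fn = lambda x: x < len(sents)
--
--   while total_length < limit and continue_fn(curr_value + increment):
--     proposed_length = total_length + sent_lens[curr_value + increment]
--     if not exceed_len and proposed_length > limit:
--       break
--     if skip_sentences and (curr_value + increment) in skip_sentences:
--       break
--     curr_value += increment
--     full_sequence = concat_fn(curr=full_sequence, extra=sents[curr_value])
--     total_length += sent_lens[curr_value]
--
--   if direction == 'prefix':
--     assert curr_value <= start
--   else:
--     assert curr_value >= start
--
--   return full_sequence, curr_value
-- ===== SOURCE B (Python) =====
-- def extend_sequence(sents, sent_lens, start, limit, exceed_len=False,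
--                     direction='prefix', skip_sentences=None):
--   """Two-phase rewrite: scan candidate indices to find the boundary, then
--   assemble the string once with ' '.join over the index range."""
--   assert len(sents) == len(sent_lens)
--   curr_value = start
--   total_length = sent_lens[start]
--   if direction == 'prefix':
--     candidates = range(start - 1, -1, -1)
--   else:
--     candidates = range(start + 1, len(sents))
--   for nxt in candidates:
--     if total_length >= limit:
--       break
--     if not exceed_len and total_length + sent_lens[nxt] > limit:
--       break
--     if skip_sentences and nxt in skip_sentences:
--       break
--     curr_value = nxt
--     total_length += sent_lens[nxt]
--   lo, hi = (curr_value, start) if direction == 'prefix' else (start, curr_value)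
--   full_sequence = ' '.join(sents[i] for i in range(lo, hi + 1))
--   return full_sequence, curr_value
-- ===== Notes on version B (the rewrite author's own statement) =====
-- stated objective: alternative
-- what changed: B separates boundary finding from string assembly: a for-loop over the candidate index range (with the same break conditions) computes only the final index, and the full sequence is then built once with ' '.join over the covered index range, instead of A's while-loop that interleaves index stepping with repeated string concatenation.
import Mathlib
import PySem

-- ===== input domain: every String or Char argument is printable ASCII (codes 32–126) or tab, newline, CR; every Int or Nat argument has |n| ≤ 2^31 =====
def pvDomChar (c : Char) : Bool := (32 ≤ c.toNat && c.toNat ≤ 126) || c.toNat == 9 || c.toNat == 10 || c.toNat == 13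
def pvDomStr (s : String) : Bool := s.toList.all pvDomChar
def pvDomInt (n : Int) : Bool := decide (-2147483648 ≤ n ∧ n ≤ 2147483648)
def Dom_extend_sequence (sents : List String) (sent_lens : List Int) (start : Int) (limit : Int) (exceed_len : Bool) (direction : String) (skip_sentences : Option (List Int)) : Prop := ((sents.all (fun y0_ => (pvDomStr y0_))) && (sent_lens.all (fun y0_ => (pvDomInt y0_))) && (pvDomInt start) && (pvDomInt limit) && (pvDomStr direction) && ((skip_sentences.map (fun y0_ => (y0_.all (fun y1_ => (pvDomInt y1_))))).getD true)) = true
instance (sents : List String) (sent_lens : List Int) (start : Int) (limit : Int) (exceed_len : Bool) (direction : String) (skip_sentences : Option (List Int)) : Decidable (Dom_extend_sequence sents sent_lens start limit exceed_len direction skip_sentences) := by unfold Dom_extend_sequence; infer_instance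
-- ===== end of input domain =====

-- B separates boundary finding (an index scan) from string assembly (one ' '.join over the index range); proved equal to A on all inputs where A returns normally.


-- shared primitives: Python indexing xs[i] (negative wrap; default never reached inside Pre_),
-- and the truthiness test 'skip_sentences and x in skip_sentences'
def pvGetS (xs : List String) (i : Int) : String := PySem.List.pyGetD xs i ""
def pvGetI (xs : List Int) (i : Int) : Int := PySem.List.pyGetD xs i 0
def pvSkip (skip : Option (List Int)) (x : Int) : Bool :=
  match skip with
  | none => false
  | some l => !l.isEmpty && l.contains x

-- ===== PORT A =====
-- A's while loop: interleaves index stepping with string concatenation.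
-- 'concat'/'cont' port A's direction lambdas; the Nat fuel only makes the recursion total —
-- extend_sequence passes sents.length + start.natAbs + 1, which exceeds the loop's iteration count.
def extendLoopA (sent_lens : List Int) (sents : List String) (limit : Int) (exceed_len : Bool)
    (skip : Option (List Int)) (inc : Int) (concat : String → String → String) (cont : Int → Bool) :
    Nat → Int → Int → String → String × Int
  | 0, curr, _, full => (full, curr)
  | fuel + 1, curr, total, full =>
    if total < limit then
      if cont (curr + inc) then
        let proposed := total + pvGetI sent_lens (curr + inc)
        if exceed_len = false ∧ proposed > limit then (full, curr)
        else if pvSkip skip (curr + inc) then (full, curr)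
        else extendLoopA sent_lens sents limit exceed_len skip inc concat cont fuel
               (curr + inc) proposed (concat full (pvGetS sents (curr + inc)))
      else (full, curr)
    else (full, curr)

def extend_sequence (sents : List String) (sent_lens : List Int) (start : Int) (limit : Int) (exceed_len : Bool) (direction : String) (skip_sentences : Option (List Int)) : String × Int :=
  let total := pvGetI sent_lens start
  let full := pvGetS sents start
  let fuel := sents.length + start.natAbs + 1
  if direction = "prefix" then
    extendLoopA sent_lens sents limit exceed_len skip_sentences (-1)
      (fun curr extra => extra ++ " " ++ curr) (fun x => decide (0 ≤ x)) fuel start total full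
  else
    extendLoopA sent_lens sents limit exceed_len skip_sentences 1
      (fun curr extra => curr ++ " " ++ extra) (fun x => decide (x < (sents.length : Int))) fuel start total full

-- ===== PORT B =====
-- B phase 1: scan the candidate index list (range(start-1,-1,-1) or range(start+1,len)) with
-- the same break conditions, tracking only the running total and the final index.
def extendScanB (sent_lens : List Int) (limit : Int) (exceed_len : Bool) (skip : Option (List Int)) :
    List Int → Int → Int → Int
  | [], curr, _ => curr
  | nxt :: rest, curr, total =>
    if limit ≤ total then curr
    else if exceed_len = false ∧ total + pvGetI sent_lens nxt > limit then curr
    else if pvSkip skip nxt then curr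
    else extendScanB sent_lens limit exceed_len skip rest nxt (total + pvGetI sent_lens nxt)

def extend_sequence_alt (sents : List String) (sent_lens : List Int) (start : Int) (limit : Int) (exceed_len : Bool) (direction : String) (skip_sentences : Option (List Int)) : String × Int :=
  let total := pvGetI sent_lens start
  let candidates := if direction = "prefix" then PySem.List.pyRange (start - 1) (-1) (-1)
                    else PySem.List.pyRange (start + 1) (sents.length : Int) 1
  let curr := extendScanB sent_lens limit exceed_len skip_sentences candidates start total
  let lo := if direction = "prefix" then curr else start
  let hi := if direction = "prefix" then start else curr
  -- B phase 2: ' '.join(sents[i] for i in range(lo, hi+1))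
  (PySem.Str.join " " ((PySem.List.pyRange lo (hi + 1) 1).map (fun i => pvGetS sents i)), curr)

-- ===== PRECONDITION & SPEC =====
-- Pre_ = exactly the inputs where Python A returns: the assert len(sents)==len(sent_lens) holds
-- and start is a valid (possibly negative) Python index, so no IndexError/AssertionError is raised.
def Pre_extend_sequence (sents : List String) (sent_lens : List Int) (start : Int) (limit : Int) (exceed_len : Bool) (direction : String) (skip_sentences : Option (List Int)) : Prop :=
  sents.length = sent_lens.length ∧ -(sents.length : Int) ≤ start ∧ start < (sents.length : Int)
instance (sents : List String) (sent_lens : List Int) (start : Int) (limit : Int) (exceed_len : Bool) (direction : String) (skip_sentences : Option (List Int)) : Decidable (Pre_extend_sequence sents sent_lens start limit exceed_len direction skip_sentences) := by unfold Pre_extend_sequence; infer_instance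

def pvWitness_extend_sequence : List String × List Int × Int × Int × Bool × String × Option (List Int) :=
  (["ab", "c", "dd"], [2, 1, 2], 1, 10, false, "prefix", none)

def Spec_extend_sequence (sents : List String) (sent_lens : List Int) (start : Int) (limit : Int) (exceed_len : Bool) (direction : String) (skip_sentences : Option (List Int)) (out : String × Int) : Prop := out = extend_sequence_alt sents sent_lens start limit exceed_len direction skip_sentences
instance (sents : List String) (sent_lens : List Int) (start : Int) (limit : Int) (exceed_len : Bool) (direction : String) (skip_sentences : Option (List Int)) (out : String × Int) : Decidable (Spec_extend_sequence sents sent_lens start limit exceed_len direction skip_sentences out) := by unfold Spec_extend_sequence; infer_instance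

-- ===== CLAIM (what is proved, stated in full; the proofs are below) =====
def Claim_equal_extend_sequence : Prop := ∀ (sents : List String) (sent_lens : List Int) (start : Int) (limit : Int) (exceed_len : Bool) (direction : String) (skip_sentences : Option (List Int)), Dom_extend_sequence sents sent_lens start limit exceed_len direction skip_sentences → Pre_extend_sequence sents sent_lens start limit exceed_len direction skip_sentences → Spec_extend_sequence sents sent_lens start limit exceed_len direction skip_sentences (extend_sequence sents sent_lens start limit exceed_len direction skip_sentences)

-- ===== LEMMAS AND PROOFS =====

-- 'the joined sequence over indices a..b' (B's phase 2 string)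
def jr (sents : List String) (a b : Int) : String :=
  PySem.Str.join " " ((PySem.List.pyRange a (b + 1) 1).map (fun i => pvGetS sents i))

lemma join_snoc (sep x p : List Char) (l : List (List Char)) :
    PySem.Chars.join sep (p :: (l ++ [x])) = PySem.Chars.join sep (p :: l) ++ sep ++ x := by
  induction l generalizing p with
  | nil =>
      show PySem.Chars.join sep (p :: [x]) = _
      rw [PySem.Chars.join_cons_cons, PySem.Chars.join_singleton, PySem.Chars.join_singleton]
  | cons q l ih =>
      rw [List.cons_append, PySem.Chars.join_cons_cons sep p q (l ++ [x]), ih q,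
          PySem.Chars.join_cons_cons sep p q l]
      simp [List.append_assoc]

lemma jr_single (sents : List String) (a : Int) : jr sents a a = pvGetS sents a := by
  unfold jr
  rw [PySem.List.pyRange_one_singleton]
  simp [PySem.Str.join, PySem.Chars.join_singleton]

lemma jr_cons (sents : List String) {a b : Int} (h : a ≤ b) :
    pvGetS sents (a - 1) ++ " " ++ jr sents a b = jr sents (a - 1) b := by
  unfold jr
  rw [← String.toList_inj]
  simp only [String.toList_append, PySem.Str.toList_join]
  rw [PySem.List.pyRange_one_cons (show a - 1 < b + 1 by omega),
      show a - 1 + 1 = a from by ring,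
      PySem.List.pyRange_one_cons (show a < b + 1 by omega)]
  simp only [List.map_cons]
  rw [PySem.Chars.join_cons_cons]

lemma jr_snoc (sents : List String) {a b : Int} (h : a ≤ b) :
    jr sents a b ++ " " ++ pvGetS sents (b + 1) = jr sents a (b + 1) := by
  unfold jr
  rw [← String.toList_inj]
  simp only [String.toList_append, PySem.Str.toList_join]
  rw [PySem.List.pyRange_one_succ_right (show a ≤ b + 1 by omega),
      PySem.List.pyRange_one_cons (show a < b + 1 by omega)]
  simp only [List.map_cons, List.map_append, List.map_nil]
  rw [List.cons_append, join_snoc]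

lemma loop_prefix (sents : List String) (sent_lens : List Int) (limit : Int) (exceed_len : Bool)
    (skip : Option (List Int)) :
    ∀ (fuel : Nat) (curr total hi : Int), curr ≤ hi →
      (PySem.List.pyRange (curr - 1) (-1) (-1)).length ≤ fuel →
      extendLoopA sent_lens sents limit exceed_len skip (-1)
          (fun c e => e ++ " " ++ c) (fun x => decide (0 ≤ x)) fuel curr total (jr sents curr hi)
        = (jr sents (extendScanB sent_lens limit exceed_len skip
              (PySem.List.pyRange (curr - 1) (-1) (-1)) curr total) hi,
           extendScanB sent_lens limit exceed_len skip
              (PySem.List.pyRange (curr - 1) (-1) (-1)) curr total) := by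
  intro fuel
  induction fuel with
  | zero =>
      intro curr total hi hle hlen
      have hnil : PySem.List.pyRange (curr - 1) (-1) (-1) = [] :=
        List.eq_nil_of_length_eq_zero (Nat.le_zero.mp hlen)
      rw [hnil]
      simp [extendLoopA, extendScanB]
  | succ f ih =>
      intro curr total hi hle hlen
      by_cases hc : curr ≤ 0
      · rw [PySem.List.pyRange_neg_one_eq_nil (by omega : curr - 1 ≤ -1)]
        simp [extendLoopA, extendScanB, show ¬ ((0:Int) ≤ curr + -1) by omega]
      · rw [PySem.List.pyRange_neg_one_cons (show (-1:Int) < curr - 1 by omega)]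
        by_cases h1 : total < limit
        · by_cases h2 : exceed_len = false ∧ total + pvGetI sent_lens (curr - 1) > limit
          · simp [extendLoopA, extendScanB, h1, h2, show ¬ limit ≤ total by omega,
                  show curr + -1 = curr - 1 from by ring]
          · by_cases h3 : pvSkip skip (curr - 1) = true
            · simp [extendLoopA, extendScanB, h1, h2, h3, show ¬ limit ≤ total by omega,
                    show curr + -1 = curr - 1 from by ring]
            · simp only [extendLoopA, extendScanB, if_pos h1, if_neg h2,
                         show curr + -1 = curr - 1 from by ring, if_neg (show ¬ limit ≤ total by omega),
                         decide_eq_true_eq, h3, Bool.false_eq_true, if_false,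
                         if_pos (show (0:Int) ≤ curr - 1 by omega)]
              rw [jr_cons sents hle]
              exact ih (curr - 1) (total + pvGetI sent_lens (curr - 1)) hi (by omega)
                (by rw [PySem.List.length_pyRange_neg_one] at hlen ⊢; omega)
        · simp [extendLoopA, extendScanB, h1, show limit ≤ total by omega]

lemma loop_suffix (sents : List String) (sent_lens : List Int) (limit : Int) (exceed_len : Bool)
    (skip : Option (List Int)) :
    ∀ (fuel : Nat) (curr total lo : Int), lo ≤ curr →
      (PySem.List.pyRange (curr + 1) (sents.length : Int) 1).length ≤ fuel →
      extendLoopA sent_lens sents limit exceed_len skip 1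
          (fun c e => c ++ " " ++ e) (fun x => decide (x < (sents.length : Int))) fuel curr total (jr sents lo curr)
        = (jr sents lo (extendScanB sent_lens limit exceed_len skip
              (PySem.List.pyRange (curr + 1) (sents.length : Int) 1) curr total),
           extendScanB sent_lens limit exceed_len skip
              (PySem.List.pyRange (curr + 1) (sents.length : Int) 1) curr total) := by
  intro fuel
  induction fuel with
  | zero =>
      intro curr total lo hle hlen
      have hnil : PySem.List.pyRange (curr + 1) (sents.length : Int) 1 = [] :=
        List.eq_nil_of_length_eq_zero (Nat.le_zero.mp hlen)
      rw [hnil]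
      simp [extendLoopA, extendScanB]
  | succ f ih =>
      intro curr total lo hle hlen
      by_cases hc : curr + 1 < (sents.length : Int)
      · rw [PySem.List.pyRange_one_cons hc]
        by_cases h1 : total < limit
        · by_cases h2 : exceed_len = false ∧ total + pvGetI sent_lens (curr + 1) > limit
          · simp [extendLoopA, extendScanB, h1, h2, show ¬ limit ≤ total by omega, hc]
          · by_cases h3 : pvSkip skip (curr + 1) = true
            · simp [extendLoopA, extendScanB, h1, h2, h3, show ¬ limit ≤ total by omega, hc]
            · simp only [extendLoopA, extendScanB, if_pos h1, if_neg h2,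
                         if_neg (show ¬ limit ≤ total by omega),
                         decide_eq_true_eq, h3, Bool.false_eq_true, if_false, if_pos hc]
              rw [jr_snoc sents hle]
              exact ih (curr + 1) (total + pvGetI sent_lens (curr + 1)) lo (by omega)
                (by rw [PySem.List.length_pyRange_one] at hlen ⊢; omega)
        · simp [extendLoopA, extendScanB, h1, show limit ≤ total by omega]
      · rw [PySem.List.pyRange_one_eq_nil (by omega : (sents.length : Int) ≤ curr + 1)]
        simp [extendLoopA, extendScanB, show ¬ (curr + 1 < (sents.length : Int)) by omega]

-- ===== VERDICT (by name: the statement is the Claim_ definition above) =====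
theorem extend_sequence_spec : Claim_equal_extend_sequence := by
  intro sents sent_lens start limit exceed_len direction skip_sentences _ hpre
  unfold Spec_extend_sequence extend_sequence extend_sequence_alt
  by_cases hd : direction = "prefix"
  · simp only [hd, reduceIte]
    rw [← jr_single sents start,
        loop_prefix sents sent_lens limit exceed_len skip_sentences _ start _ start le_rfl (by
          rw [PySem.List.length_pyRange_neg_one]; omega)]
    simp [jr]
  · simp only [if_neg hd]
    rw [← jr_single sents start,
        loop_suffix sents sent_lens limit exceed_len skip_sentences _ start _ start le_rfl (by
          rw [PySem.List.length_pyRange_one]; omega)]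
    simp [jr]
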